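-- pv_equiv track=rewrite | github.com/broadinstitute/gatk-sv | module20_srGS_constraint_reanalyze/scripts/permute_gtf.py | build_allowed_intervals
-- ===== SOURCE A (Python) =====
-- def build_allowed_intervals(chrom_sizes, exclusions):
--     """
--     For every chromosome compute the list of (start, end) windows where a gene
--     *start* can be placed.  We merge exclusion intervals and subtract them from
--     [0, chrom_size).  Returns dict chrom -> list of (start, end), and a parallel
--     list of cumulative lengths for weighted random choice.
--     """
--     allowed = {}
--     for chrom, size in chrom_sizes.items():
--         excl = sorted(exclusions.get(chrom, []))
--         free = []
--         pos = 0
--         for es, ee in excl: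
--             if es > pos:
--                 free.append((pos, es))
--             pos = max(pos, ee)
--         if pos < size:
--             free.append((pos, size))
--         allowed[chrom] = free
--     return allowed
-- ===== SOURCE B (Python) =====
-- def build_allowed_intervals(chrom_sizes, exclusions):
--     """Staged rewrite: pre-sort every exclusion list once into a lookup table; then per
--     chromosome build the prefix-maximum 'reach' list and pair each reach value with the
--     next exclusion start (or the chromosome size), keeping the non-empty gaps."""
--     sorted_excl = {c: sorted(iv) for c, iv in exclusions.items()}
--     allowed = {}
--     for chrom, size in chrom_sizes.items():
--         excl = sorted_excl.get(chrom, [])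
--         reach = [0]
--         for _, ee in excl:
--             reach.append(max(reach[-1], ee))
--         bounds = [es for es, _ in excl] + [size]
--         allowed[chrom] = [(p, b) for p, b in zip(reach, bounds) if b > p]
--     return allowed
-- ===== Notes on version B (the rewrite author's own statement) =====
-- stated objective: alternative
-- what changed: A's single fused loop that emits gaps while subtracting is replaced by staged passes: all exclusion lists are pre-sorted once into a lookup table, then each chromosome's prefix-maximum 'reach' list is built and zipped against the next exclusion starts (plus the chromosome size), keeping the non-empty gaps; A's conditional-append accumulator loop disappears.
import Mathlib
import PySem

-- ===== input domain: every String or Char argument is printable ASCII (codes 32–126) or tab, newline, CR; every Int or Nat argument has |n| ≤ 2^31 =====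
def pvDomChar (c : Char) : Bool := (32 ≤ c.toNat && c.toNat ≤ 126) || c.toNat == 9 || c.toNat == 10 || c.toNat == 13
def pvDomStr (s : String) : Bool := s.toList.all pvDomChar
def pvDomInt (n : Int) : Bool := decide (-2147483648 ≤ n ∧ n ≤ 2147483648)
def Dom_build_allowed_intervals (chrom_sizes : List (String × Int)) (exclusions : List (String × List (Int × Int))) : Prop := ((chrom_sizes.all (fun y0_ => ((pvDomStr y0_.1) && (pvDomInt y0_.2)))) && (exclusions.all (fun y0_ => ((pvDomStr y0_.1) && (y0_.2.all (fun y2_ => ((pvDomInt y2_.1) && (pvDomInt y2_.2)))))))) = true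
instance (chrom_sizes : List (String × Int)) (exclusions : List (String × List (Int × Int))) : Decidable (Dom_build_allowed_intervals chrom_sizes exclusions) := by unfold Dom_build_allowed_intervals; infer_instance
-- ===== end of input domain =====

-- B replaces A's fused subtract-while-walking loop by staged passes: a pre-sorting pass over all
-- exclusion lists, then a prefix-maximum 'reach' list zipped against the next exclusion starts
-- (plus the chromosome size) and filtered; same results, alternative decomposition.

-- ===== PORT A =====
-- the body of A's inner `for es, ee in excl` loop: state (free, pos)
def pvStepA (st : List (Int × Int) × Int) (p : Int × Int) : List (Int × Int) × Int :=
  ((if p.1 > st.2 then st.1 ++ [(st.2, p.1)] else st.1), max st.2 p.2)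

-- A's per-chromosome computation, applied to the already-sorted `excl`
def pvFreeA (excl : List (Int × Int)) (size : Int) : List (Int × Int) :=
  let st := excl.foldl pvStepA ([], 0)
  if st.2 < size then st.1 ++ [(st.2, size)] else st.1

def build_allowed_intervals (chrom_sizes : List (String × Int)) (exclusions : List (String × List (Int × Int))) : List (String × List (Int × Int)) :=
  (chrom_sizes.foldl
    (fun (allowed : PySem.Dict String (List (Int × Int))) c =>
      allowed.insert c.1
        (pvFreeA (PySem.List.sorted2 ((PySem.Dict.mk exclusions).getD c.1 []) (·.1) (·.2) false) c.2))
    PySem.Dict.empty).items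

-- ===== PORT B =====
-- reach[-1]; `reach` is never empty (it starts as [0]), so the .getD default is never read
def pvLast (r : List Int) : Int := (PySem.List.pyGet? r (-1)).getD 0

-- B's `reach` pass: reach = [0]; for _, ee in excl: reach.append(max(reach[-1], ee))
def pvReach (excl : List (Int × Int)) : List Int :=
  excl.foldl (fun r q => r ++ [max (pvLast r) q.2]) [0]

-- B's per-chromosome computation: reach zipped with the bounds list, keeping non-empty gaps
def pvFreeB (excl : List (Int × Int)) (size : Int) : List (Int × Int) :=
  let bounds := excl.map (·.1) ++ [size]
  ((pvReach excl).zip bounds).filter (fun g => g.2 > g.1)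

def build_allowed_intervals_alt (chrom_sizes : List (String × Int)) (exclusions : List (String × List (Int × Int))) : List (String × List (Int × Int)) :=
  -- sorted_excl = {c: sorted(iv) for c, iv in exclusions.items()} (keys of a dict comprehension are
  -- the dict's own keys, so the pair list is mapped value-wise)
  let sorted_excl : PySem.Dict String (List (Int × Int)) :=
    PySem.Dict.mk (exclusions.map (fun c => (c.1, PySem.List.sorted2 c.2 (·.1) (·.2) false)))
  (chrom_sizes.foldl
    (fun (allowed : PySem.Dict String (List (Int × Int))) c =>
      allowed.insert c.1 (pvFreeB (sorted_excl.getD c.1 []) c.2))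
    PySem.Dict.empty).items

-- ===== PRECONDITION & SPEC =====
def Spec_build_allowed_intervals (chrom_sizes : List (String × Int)) (exclusions : List (String × List (Int × Int))) (out : List (String × List (Int × Int))) : Prop := out = build_allowed_intervals_alt chrom_sizes exclusions
instance (chrom_sizes : List (String × Int)) (exclusions : List (String × List (Int × Int))) (out : List (String × List (Int × Int))) : Decidable (Spec_build_allowed_intervals chrom_sizes exclusions out) := by unfold Spec_build_allowed_intervals; infer_instance

-- ===== CLAIM (what is proved, stated in full; the proofs are below) =====
def Claim_equal_build_allowed_intervals : Prop := ∀ (chrom_sizes : List (String × Int)) (exclusions : List (String × List (Int × Int))), Dom_build_allowed_intervals chrom_sizes exclusions → Spec_build_allowed_intervals chrom_sizes exclusions (build_allowed_intervals chrom_sizes exclusions)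

-- ===== LEMMAS AND PROOFS =====

-- proof-side: the gap walk both sides effectively compute
def pvWalk (pos : Int) : List (Int × Int) → Int → List (Int × Int)
  | [], size => if pos < size then [(pos, size)] else []
  | q :: rest, size => (if q.1 > pos then [(pos, q.1)] else []) ++ pvWalk (max pos q.2) rest size

-- proof-side: recursive form of B's reach tail
def pvEnds (m : Int) : List (Int × Int) → List Int
  | [] => []
  | q :: rest => max m q.2 :: pvEnds (max m q.2) rest

theorem pvFreeA_walk_aux (excl : List (Int × Int)) : ∀ (free : List (Int × Int)) (pos size : Int),
    (if (excl.foldl pvStepA (free, pos)).2 < size then (excl.foldl pvStepA (free, pos)).1 ++ [((excl.foldl pvStepA (free, pos)).2, size)] else (excl.foldl pvStepA (free, pos)).1)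
      = free ++ pvWalk pos excl size := by
  induction excl with
  | nil => intro free pos size; simp only [List.foldl_nil, pvWalk]; split_ifs <;> simp
  | cons q t ih =>
    intro free pos size
    simp only [List.foldl_cons, pvStepA, pvWalk]
    by_cases h : q.1 > pos
    · simp only [if_pos h, ih, List.append_assoc, List.singleton_append]
    · simp only [if_neg h, ih, List.nil_append]

theorem pvFreeA_walk (excl : List (Int × Int)) (size : Int) :
    pvFreeA excl size = pvWalk 0 excl size := by
  have h := pvFreeA_walk_aux excl [] 0 size
  simpa [pvFreeA] using h

theorem pvLast_concat (acc : List Int) (m : Int) : pvLast (acc ++ [m]) = m := by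
  simp [pvLast, PySem.List.pyGet?_neg_one_append_singleton]

theorem pvReach_aux (excl : List (Int × Int)) : ∀ (acc : List Int) (m : Int),
    excl.foldl (fun r q => r ++ [max (pvLast r) q.2]) (acc ++ [m]) = acc ++ m :: pvEnds m excl := by
  induction excl with
  | nil => intro acc m; simp [pvEnds]
  | cons q t ih =>
    intro acc m
    simp only [List.foldl_cons, pvLast_concat, pvEnds]
    have := ih (acc ++ [m]) (max m q.2)
    simpa [List.append_assoc] using this

theorem pvReach_ends (excl : List (Int × Int)) : pvReach excl = 0 :: pvEnds 0 excl := by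
  have h := pvReach_aux excl [] 0
  simpa [pvReach] using h

theorem pvZip_walk (excl : List (Int × Int)) : ∀ (pos size : Int),
    (((pos :: pvEnds pos excl).zip (excl.map (·.1) ++ [size])).filter (fun g => g.2 > g.1))
      = pvWalk pos excl size := by
  induction excl with
  | nil =>
    intro pos size
    simp only [pvEnds, pvWalk, List.map_nil, List.nil_append, List.zip_cons_cons, List.zip_nil_left,
      List.filter]
    by_cases h : pos < size
    · simp [h]
    · simp [h]
  | cons q t ih =>
    intro pos size
    simp only [pvEnds, pvWalk, List.map_cons, List.cons_append, List.zip_cons_cons, List.filter]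
    by_cases h : q.1 > pos
    · simp [h, ih]
    · simp [h, ih]

theorem pvFreeA_eq_pvFreeB (excl : List (Int × Int)) (size : Int) :
    pvFreeA excl size = pvFreeB excl size := by
  rw [pvFreeA_walk]
  unfold pvFreeB
  rw [pvReach_ends, pvZip_walk]

-- first-match lookup on the value-wise sorted pair list = sorting the first-match lookup
theorem get?_mk_sorted (l : List (String × List (Int × Int))) (k : String) :
    (PySem.Dict.mk (l.map (fun c => (c.1, PySem.List.sorted2 c.2 (·.1) (·.2) false)))).get? k
      = ((PySem.Dict.mk l).get? k).map (fun v => PySem.List.sorted2 v (·.1) (·.2) false) := by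
  induction l with
  | nil => simp [PySem.Dict.get?]
  | cons p t ih =>
    rw [List.map_cons, PySem.Dict.get?_mk_cons, PySem.Dict.get?_mk_cons]
    by_cases h : (p.1 == k) = true
    · simp [h]
    · simp [h, ih]

-- B's pre-sorted lookup equals sorting A's lookup
theorem sorted_lookup (exclusions : List (String × List (Int × Int))) (k : String) :
    (PySem.Dict.mk (exclusions.map (fun c => (c.1, PySem.List.sorted2 c.2 (·.1) (·.2) false)))).getD k []
      = PySem.List.sorted2 ((PySem.Dict.mk exclusions).getD k []) (·.1) (·.2) false := by
  rw [PySem.Dict.getD_eq_get?_getD, PySem.Dict.getD_eq_get?_getD, get?_mk_sorted]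
  cases h : (PySem.Dict.mk exclusions).get? k with
  | none => simp [PySem.List.sorted2]
  | some v => simp

-- ===== VERDICT (by name: the statement is the Claim_ definition above) =====
theorem build_allowed_intervals_spec : Claim_equal_build_allowed_intervals := by
  intro chrom_sizes exclusions _
  unfold Spec_build_allowed_intervals build_allowed_intervals build_allowed_intervals_alt
  simp only [sorted_lookup, pvFreeA_eq_pvFreeB]
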